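-- pv_equiv track=rewrite | github.com/hangjoo/backjoon | Python/2309.py | find
-- ===== SOURCE A (Python) =====
-- def find(count, ans_list, height_list):
--     if count == 7 and sum(ans_list) == 100:
--         return True
--     elif count > 7 or sum(ans_list) > 100:
--         return False
--     else:
--         for i in range(len(height_list)):
--             ans_list.append(height_list[i])
--             if find(count + 1, ans_list, height_list[i + 1 :]):
--                 return True
--             else:
--                 ans_list.pop()
--         return False
-- ===== SOURCE B (Python) =====
-- def find(count, ans_list, height_list):
--     # Equivalent in return value only: A mutates ans_list, B does not.
--     return _solve(7 - count, 100 - sum(ans_list), height_list)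
--
--
-- def _solve(need, target, hs):
--     if need == 0 and target == 0:
--         return True
--     if need < 0 or target < 0:
--         return False
--     if not hs:
--         return False
--     return _solve(need - 1, target - hs[0], hs[1:]) or _solve(need, target, hs[1:])
-- ===== Notes on version B (the rewrite author's own statement) =====
-- stated objective: alternative
-- what changed: Replaces A's mutate-append/pop DFS with an index loop over remaining elements by a pure take/skip binary recursion on the list head, carrying only the remaining count (7-count) and remaining sum (100-sum) instead of the growing answer list.
import Mathlib
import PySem

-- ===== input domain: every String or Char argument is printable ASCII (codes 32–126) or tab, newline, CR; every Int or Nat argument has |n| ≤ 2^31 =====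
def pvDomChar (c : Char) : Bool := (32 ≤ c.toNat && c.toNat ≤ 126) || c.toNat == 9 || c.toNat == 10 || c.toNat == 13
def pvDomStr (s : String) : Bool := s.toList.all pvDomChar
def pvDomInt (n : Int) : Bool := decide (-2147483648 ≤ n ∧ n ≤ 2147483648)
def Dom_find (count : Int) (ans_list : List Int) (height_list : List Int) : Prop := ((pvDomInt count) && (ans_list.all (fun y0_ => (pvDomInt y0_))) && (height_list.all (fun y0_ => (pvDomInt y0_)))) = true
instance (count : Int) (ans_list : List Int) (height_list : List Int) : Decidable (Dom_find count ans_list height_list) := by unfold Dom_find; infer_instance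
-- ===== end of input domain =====

-- B replaces A's append/pop DFS with an index loop by a pure take/skip recursion
-- carrying the remaining count and remaining sum (equivalence is about the RETURN
-- value only: A mutates ans_list, B does not).


-- ===== PORT A =====
-- the for-loop over i with suffix height_list[i+1:] is transliterated as a
-- recursion over the tails of height_list (same iterations, same order);
-- ans_list.append/pop on the mutable list becomes passing ans_list ++ [h]
mutual
def find (count : Int) (ans_list : List Int) (height_list : List Int) : Bool :=
  if count = 7 ∧ ans_list.sum = 100 then true
  else if count > 7 ∨ ans_list.sum > 100 then false
  else findLoop count ans_list height_list
termination_by 2 * height_list.length + 1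
decreasing_by simp

def findLoop (count : Int) (ans_list : List Int) (height_list : List Int) : Bool :=
  match height_list with
  | [] => false
  | h :: rest =>
    if find (count + 1) (ans_list ++ [h]) rest then true
    else findLoop count ans_list rest
termination_by 2 * height_list.length
decreasing_by all_goals simp [List.length_cons] <;> omega
end

-- ===== PORT B =====
def solveB (need : Int) (target : Int) (hs : List Int) : Bool :=
  if need = 0 ∧ target = 0 then true
  else if need < 0 ∨ target < 0 then false
  else
    match hs with
    | [] => false
    | h :: rest => solveB (need - 1) (target - h) rest || solveB need target rest

def find_alt (count : Int) (ans_list : List Int) (height_list : List Int) : Bool :=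
  solveB (7 - count) (100 - ans_list.sum) height_list

-- ===== PRECONDITION & SPEC =====
def Spec_find (count : Int) (ans_list : List Int) (height_list : List Int) (out : Bool) : Prop := out = find_alt count ans_list height_list
instance (count : Int) (ans_list : List Int) (height_list : List Int) (out : Bool) : Decidable (Spec_find count ans_list height_list out) := by unfold Spec_find; infer_instance

-- ===== CLAIM (what is proved, stated in full; the proofs are below) =====
def Claim_equal_find : Prop := ∀ (count : Int) (ans_list : List Int) (height_list : List Int), Dom_find count ans_list height_list → Spec_find count ans_list height_list (find count ans_list height_list)

-- ===== LEMMAS AND PROOFS =====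
theorem find_eq_solveB : ∀ (hs : List Int) (c : Int) (ans : List Int),
    find c ans hs = solveB (7 - c) (100 - ans.sum) hs := by
  intro hs
  induction hs with
  | nil =>
    intro c ans
    rw [find, solveB, findLoop]
    split_ifs with h1 h2 h3 h4 h5 h6 <;> try rfl
    all_goals omega
  | cons h rest ih =>
    intro c ans
    rw [find, solveB]
    have e1 : (7 - c = 0 ∧ 100 - ans.sum = 0) ↔ (c = 7 ∧ ans.sum = 100) := by omega
    have e2 : (7 - c < 0 ∨ 100 - ans.sum < 0) ↔ (c > 7 ∨ ans.sum > 100) := by omega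
    simp only [e1, e2]
    split_ifs with h1 h2
    · rfl
    · rfl
    · -- loop body: take h, or continue the loop over rest
      rw [findLoop]
      have htake : find (c + 1) (ans ++ [h]) rest
          = solveB (7 - c - 1) (100 - ans.sum - h) rest := by
        rw [ih (c + 1) (ans ++ [h])]
        congr 1
        · ring
        · simp [List.sum_append]; ring
      have hskip : findLoop c ans rest = solveB (7 - c) (100 - ans.sum) rest := by
        have hf := ih c ans
        rw [find] at hf
        rw [if_neg h1, if_neg h2] at hf
        exact hf
      rw [htake, hskip]
      cases solveB (7 - c - 1) (100 - ans.sum - h) rest <;> simp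

-- ===== VERDICT (by name: the statement is the Claim_ definition above) =====
theorem find_spec : Claim_equal_find := by
  intro count ans_list height_list _
  unfold Spec_find find_alt
  exact find_eq_solveB height_list count ans_list
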